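-- pv_equiv track=rewrite | github.com/krsfer/krispc | p2c/config/caregiver_settings.py | get_next_available_color
-- ===== SOURCE A (Python) =====
-- from typing import Any, Dict
--
-- AVAILABLE_COLOR_IDS = ["1", "2", "3", "4", "5", "6", "7", "8", "9", "10", "11"]
--
-- def get_next_available_color(existing_settings: Dict[str, Dict[str, Any]]) -> str:
--     """Get the next available color ID that hasn't been used yet.
--
--     Cycles through colors 1-11, trying to avoid recently used colors.
--
--     Args:
--         existing_settings: Dict of existing caregiver->settings mappings.
--
--     Returns:
--         A colorId string (1-11).
--     """
--     used_colors = {s.get("colorId") for s in existing_settings.values()}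
--
--     # First, try to find an unused color
--     for color_id in AVAILABLE_COLOR_IDS:
--         if color_id not in used_colors:
--             return color_id
--
--     # If all colors are used, count usage and return least used
--     color_counts = {c: 0 for c in AVAILABLE_COLOR_IDS}
--     for s in existing_settings.values():
--         color_id = s.get("colorId")
--         if color_id in color_counts:
--             color_counts[color_id] += 1
--
--     # Return the least used color
--     return min(color_counts, key=color_counts.get)
-- ===== SOURCE B (Python) =====
-- AVAILABLE_COLOR_IDS = ["1", "2", "3", "4", "5", "6", "7", "8", "9", "10", "11"]
--
-- def get_next_available_color(existing_settings):
--     """Pick the first unused color ID, or the least-used one if all are used."""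
--     used = [s.get("colorId") for s in existing_settings.values()]
--     return min(AVAILABLE_COLOR_IDS, key=used.count)
-- ===== Notes on version B (the rewrite author's own statement) =====
-- stated objective: simpler
-- what changed: Replaces A's two phases (a set-membership scan for the first unused color, then a separate counting dict plus min) with a single min over AVAILABLE_COLOR_IDS keyed by used.count: an unused color has count 0, so min's first-minimum tie-break returns the first unused color exactly like A's first loop, and the least-used color when all are used.
import Mathlib
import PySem

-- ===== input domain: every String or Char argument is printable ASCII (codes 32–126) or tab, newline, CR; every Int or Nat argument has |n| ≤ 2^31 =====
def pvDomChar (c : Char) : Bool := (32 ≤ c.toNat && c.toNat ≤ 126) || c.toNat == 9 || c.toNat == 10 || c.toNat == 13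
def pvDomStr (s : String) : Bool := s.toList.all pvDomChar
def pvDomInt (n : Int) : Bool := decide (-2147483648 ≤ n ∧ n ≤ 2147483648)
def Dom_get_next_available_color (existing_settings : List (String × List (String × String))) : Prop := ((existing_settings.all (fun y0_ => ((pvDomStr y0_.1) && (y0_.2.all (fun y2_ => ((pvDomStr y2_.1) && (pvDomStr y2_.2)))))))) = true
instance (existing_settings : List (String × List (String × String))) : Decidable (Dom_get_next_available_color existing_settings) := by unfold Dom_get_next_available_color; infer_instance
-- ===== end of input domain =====

-- B replaces A's two phases (first-unused scan over a set, then a counting dict + min) by one min over the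
-- color list keyed by the usage count; proved to return the same color on every input.


-- ===== PORT A =====
-- module constant AVAILABLE_COLOR_IDS (shared by both sources)
def pvAvailableColorIds : List String := ["1", "2", "3", "4", "5", "6", "7", "8", "9", "10", "11"]

-- s.get("colorId") on an inner settings dict (both sources use it)
def pvColorIdOf (s : List (String × String)) : Option String := (PySem.Dict.ofList s).get? "colorId"

def get_next_available_color (existing_settings : List (String × List (String × String))) : String :=
  let vals := (PySem.Dict.ofList existing_settings).values
  let used_colors : PySem.Set (Option String) := PySem.Set.ofList (vals.map (fun s => pvColorIdOf s))
  match pvAvailableColorIds.find? (fun c => !(PySem.Set.contains used_colors (some c))) with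
  | some color_id => color_id
  | none =>
    let init := pvAvailableColorIds.foldl (fun d c => d.insert c (0 : Int)) PySem.Dict.empty
    let color_counts := vals.foldl (fun d s =>
        match pvColorIdOf s with
        | some cid => if d.contains cid then d.modify cid 0 (· + 1) else d
        | none => d) init
    -- min(color_counts, key=color_counts.get): every key of color_counts is present, so .get is getD _ 0;
    -- min never sees an empty dict (11 keys), the "" default is unreachable
    (PySem.List.min? color_counts.keys (fun k => color_counts.getD k 0)).getD ""

-- ===== PORT B =====
def get_next_available_color_alt (existing_settings : List (String × List (String × String))) : String :=
  let used := (PySem.Dict.ofList existing_settings).values.map (fun s => pvColorIdOf s)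
  (PySem.List.min? pvAvailableColorIds (fun c => PySem.List.count used (some c))).getD ""

-- ===== PRECONDITION & SPEC =====
def Spec_get_next_available_color (existing_settings : List (String × List (String × String))) (out : String) : Prop := out = get_next_available_color_alt existing_settings
instance (existing_settings : List (String × List (String × String))) (out : String) : Decidable (Spec_get_next_available_color existing_settings out) := by unfold Spec_get_next_available_color; infer_instance

-- ===== CLAIM (what is proved, stated in full; the proofs are below) =====
def Claim_equal_get_next_available_color : Prop := ∀ (existing_settings : List (String × List (String × String))), Dom_get_next_available_color existing_settings → Spec_get_next_available_color existing_settings (get_next_available_color existing_settings)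

-- ===== LEMMAS AND PROOFS =====

-- the foldl underlying PySem.List.min?, as a named step function
def pvMinStep {α κ : Type} [LinearOrder κ] (key : α → κ) (acc : Option α) (x : α) : Option α :=
  match acc with
  | none => some x
  | some m => if key x < key m then some x else some m

lemma pvMin?_eq_foldl {α κ : Type} [LinearOrder κ] (xs : List α) (key : α → κ) :
    PySem.List.min? xs key = xs.foldl (pvMinStep key) none := by
  rfl

-- once the accumulator holds a minimal element, the fold keeps it
lemma pvFoldl_stay {α κ : Type} [LinearOrder κ] (key : α → κ) (m : α) (l : List α)
    (h : ∀ y ∈ l, key m ≤ key y) : l.foldl (pvMinStep key) (some m) = some m := by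
  induction l with
  | nil => rfl
  | cons y t ih =>
    have hy : ¬ key y < key m := not_lt.mpr (h y (by simp))
    have hstep : pvMinStep key (some m) y = some m := by simp [pvMinStep, hy]
    rw [List.foldl_cons, hstep]
    exact ih (fun z hz => h z (by simp [hz]))

-- min? returns the FIRST minimal element
lemma pvMin?_first {α κ : Type} [LinearOrder κ] (key : α → κ) (pre : List α) (c : α) (post : List α)
    (h1 : ∀ y ∈ pre, key c < key y) (h2 : ∀ y ∈ post, key c ≤ key y) :
    PySem.List.min? (pre ++ c :: post) key = some c := by
  rw [pvMin?_eq_foldl, List.foldl_append]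
  rcases hpre : List.foldl (pvMinStep key) none pre with _ | m
  · rw [List.foldl_cons]
    exact pvFoldl_stay key c post h2
  · have hm : m ∈ pre := PySem.List.min?_mem (key := key) (by rw [pvMin?_eq_foldl]; exact hpre)
    have hstep : pvMinStep key (some m) c = some c := by simp [pvMinStep, h1 m hm]
    rw [List.foldl_cons, hstep]
    exact pvFoldl_stay key c post h2

-- congruence: min? only looks at the key on members of the list
lemma pvFoldl_min_congr {α κ : Type} [LinearOrder κ] (k1 k2 : α → κ) (l : List α) (acc : Option α)
    (hacc : ∀ m, acc = some m → k1 m = k2 m) (h : ∀ x ∈ l, k1 x = k2 x) :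
    l.foldl (pvMinStep k1) acc = l.foldl (pvMinStep k2) acc := by
  induction l generalizing acc with
  | nil => rfl
  | cons x t ih =>
    have hx : k1 x = k2 x := h x (by simp)
    have hstep : pvMinStep k1 acc x = pvMinStep k2 acc x := by
      cases acc with
      | none => rfl
      | some m => simp [pvMinStep, hx, hacc m rfl]
    rw [List.foldl_cons, List.foldl_cons, hstep]
    refine ih _ (fun m hm => ?_) (fun z hz => h z (List.mem_cons_of_mem _ hz))
    cases acc with
    | none =>
      simp [pvMinStep] at hm
      subst hm; exact hx
    | some m0 =>
      by_cases hlt : k2 x < k2 m0 <;> simp [pvMinStep, hlt] at hm <;> subst hm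
      · exact hx
      · exact hacc m0 rfl

lemma pvMin?_congr {α κ : Type} [LinearOrder κ] (k1 k2 : α → κ) (l : List α)
    (h : ∀ x ∈ l, k1 x = k2 x) :
    PySem.List.min? l k1 = PySem.List.min? l k2 := by
  rw [pvMin?_eq_foldl, pvMin?_eq_foldl]
  exact pvFoldl_min_congr k1 k2 l none (by simp) h

-- min? with an Int-cast key equals min? with the Nat key
lemma pvMin?_cast {α : Type} (l : List α) (f : α → Nat) :
    PySem.List.min? l (fun x => ((f x : Int))) = PySem.List.min? l f := by
  simp only [PySem.List.min?, Nat.cast_lt]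

-- A's counting loop, reindexed over the list of extracted colorIds
def pvCountStep (d : PySem.Dict String Int) (o : Option String) : PySem.Dict String Int :=
  match o with
  | some cid => if d.contains cid then d.modify cid 0 (· + 1) else d
  | none => d

lemma pvLoop (used : List (Option String)) (d : PySem.Dict String Int) :
    (used.foldl pvCountStep d).keys = d.keys ∧
    ∀ c, d.contains c = true →
      (used.foldl pvCountStep d).getD c 0 = d.getD c 0 + (used.count (some c) : Int) := by
  induction used generalizing d with
  | nil => simp
  | cons o t ih =>
    match o with
    | none =>
      refine ⟨(ih d).1, fun c hc => ?_⟩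
      have := (ih d).2 c hc
      simpa [pvCountStep, List.count_cons] using this
    | some cid =>
      by_cases hcid : d.contains cid = true
      · have hkeys : (d.modify cid 0 (· + 1)).keys = d.keys := by
          rw [PySem.Dict.keys_modify, PySem.Dict.keys_insert_of_contains _ _ hcid]
        have hcont : ∀ c, d.contains c = true → (d.modify cid 0 (· + 1)).contains c = true := by
          intro c hc
          rw [PySem.Dict.contains_modify]
          simp [hc]
        constructor
        · simp only [List.foldl_cons, pvCountStep, hcid, if_pos]
          rw [(ih _).1, hkeys]
        · intro c hc
          simp only [List.foldl_cons, pvCountStep, hcid, if_pos]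
          rw [(ih _).2 c (hcont c hc), PySem.Dict.getD_modify, List.count_cons]
          by_cases hec : c = cid
          · subst hec; simp; ring
          · have : ¬ ((some cid : Option String) == some c) = true := by simp [Ne.symm hec]
            simp [hec, this]
      · have hcid' : d.contains cid = false := by simpa using hcid
        refine ⟨by simpa [pvCountStep, hcid'] using (ih d).1, fun c hc => ?_⟩
        have hne : ¬ ((some cid : Option String) == some c) = true := by
          simp only [beq_iff_eq, Option.some.injEq]
          intro h; subst h; rw [hc] at hcid'; cases hcid'
        have := (ih d).2 c hc
        simpa [pvCountStep, hcid', List.count_cons, hne] using this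

-- the initial dict {c: 0 for c in AVAILABLE_COLOR_IDS}
def pvInit : PySem.Dict String Int := pvAvailableColorIds.foldl (fun d c => d.insert c (0 : Int)) PySem.Dict.empty

lemma pvInit_keys : pvInit.keys = pvAvailableColorIds := by decide

lemma pvInit_getD (c : String) : pvInit.getD c 0 = 0 := by
  simp only [pvInit, pvAvailableColorIds, List.foldl_cons, List.foldl_nil,
    PySem.Dict.getD_insert, PySem.Dict.getD_empty]
  split_ifs <;> rfl

-- the whole comparison, phrased over the list of inner settings dicts
lemma pvMain (vals : List (List (String × String))) :
    (match pvAvailableColorIds.find? (fun c =>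
        !(PySem.Set.contains (PySem.Set.ofList (vals.map (fun s => pvColorIdOf s))) (some c))) with
     | some color_id => color_id
     | none =>
       let color_counts := vals.foldl (fun d s =>
           match pvColorIdOf s with
           | some cid => if d.contains cid then d.modify cid 0 (· + 1) else d
           | none => d) pvInit
       (PySem.List.min? color_counts.keys (fun k => color_counts.getD k 0)).getD "")
    = (PySem.List.min? pvAvailableColorIds
        (fun c => PySem.List.count (vals.map (fun s => pvColorIdOf s)) (some c))).getD "" := by
  have hfold : vals.foldl (fun d s =>
      match pvColorIdOf s with
      | some cid => if d.contains cid then d.modify cid 0 (· + 1) else d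
      | none => d) pvInit = (vals.map (fun s => pvColorIdOf s)).foldl pvCountStep pvInit := by
    rw [List.foldl_map]
    rfl
  set used := vals.map (fun s => pvColorIdOf s) with hused
  rcases hfind : pvAvailableColorIds.find? (fun c => !(PySem.Set.contains (PySem.Set.ofList used) (some c))) with _ | c
  · -- no unused color: both sides are the min over the same counts
    simp only [hfold]
    have hkeys : (used.foldl pvCountStep pvInit).keys = pvAvailableColorIds := by
      rw [(pvLoop used pvInit).1, pvInit_keys]
    rw [hkeys]
    have hkey : ∀ k ∈ pvAvailableColorIds,
        (used.foldl pvCountStep pvInit).getD k 0 = ((PySem.List.count used (some k) : Nat) : Int) := by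
      intro k hk
      have hck : pvInit.contains k = true := by
        rw [PySem.Dict.contains_eq_decide_mem_keys, pvInit_keys]
        simpa using hk
      rw [(pvLoop used pvInit).2 k hck, pvInit_getD]
      simp [PySem.List.count]
    rw [pvMin?_congr _ _ _ hkey, pvMin?_cast]
  · -- first unused color c: B's min lands on c too
    rw [List.find?_eq_some_iff_append] at hfind
    obtain ⟨hpc, pre, post, hsplit, hpre⟩ := hfind
    have hciff : ∀ x : Option String, PySem.Set.contains (PySem.Set.ofList used) x = true ↔ x ∈ used := by
      intro x
      simp [PySem.Set.contains, PySem.Set.mem_ofList]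
    have hc_unused : (some c) ∉ used := by
      intro hmem
      rw [(hciff (some c)).mpr hmem] at hpc
      exact absurd hpc (by simp)
    have hKc : PySem.List.count used (some c) = 0 := by
      simpa [PySem.List.count, List.count_eq_zero] using hc_unused
    have hpre' : ∀ y ∈ pre, PySem.List.count used (some c) < PySem.List.count used (some y) := by
      intro y hy
      have hy' := hpre y hy
      rw [Bool.not_not] at hy'
      have hmem : (some y) ∈ used := (hciff (some y)).mp hy'
      have : 0 < PySem.List.count used (some y) := by
        simpa [PySem.List.count, List.count_pos_iff] using hmem
      omega
    have hpost : ∀ y ∈ post, PySem.List.count used (some c) ≤ PySem.List.count used (some y) := by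
      intro y _
      rw [hKc]
      exact Nat.zero_le _
    have hmin : PySem.List.min? pvAvailableColorIds (fun x => PySem.List.count used (some x)) = some c := by
      rw [hsplit]
      exact pvMin?_first _ pre c post hpre' hpost
    rw [hmin]
    rfl

-- ===== VERDICT (by name: the statement is the Claim_ definition above) =====
theorem get_next_available_color_spec : Claim_equal_get_next_available_color := by
  intro es _
  show get_next_available_color es = get_next_available_color_alt es
  exact pvMain ((PySem.Dict.ofList es).values)
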